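-- pv_equiv track=rewrite | github.com/wenting-zhao/lex-leader | lexleader.py | _or_helper
-- ===== SOURCE A (Python) =====
-- def _or_helper(vector1, vector2):
--     """ creates the lex-leader constraints between two vectors of variables
--         via the plain OR decomposition encoding
--         inputs:
--             vector1, vector2: lists of integers, equivalent lengths,
--                               each representing a vector of variables
--         returns:
--             string containing the full expression of the lex-leader constraint
--     """
--     # setup vectors with 1-based indexing to match constraints in the source paper
--     A = [None] + vector1
--     B = [None] + vector2
--
--     res = []
--     res.append( "(!x{} & x{})".format(A[1], B[1]) )
--
--     assert len(vector1) == len(vector2)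
--     for i in range(1, len(vector1)):
--         temp = []
--         for j in range(1, i+1):
--             temp.append( "(x{} = x{})".format(A[j], B[j]) )
--         temp = " & ".join(temp)
--         res.append( "({} & (!x{} & x{}))".format(temp, A[i+1], B[i+1]) )
--
--     temp = []
--     for i in range(1, len(vector1)+1):
--         temp.append( "(x{} = x{})".format(A[i], B[i]) )
--     res.append(" & ".join(temp))
--
--     return "("+"\n| ".join(res)+")"
-- ===== SOURCE B (Python) =====
-- def _or_helper(vector1, vector2):
--     assert len(vector1) == len(vector2)
--     prefix = "(x{} = x{})".format(vector1[0], vector2[0])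
--     lines = ["(!x{} & x{})".format(vector1[0], vector2[0])]
--     for i in range(1, len(vector1)):
--         lines.append("({} & (!x{} & x{}))".format(prefix, vector1[i], vector2[i]))
--         prefix += " & (x{} = x{})".format(vector1[i], vector2[i])
--     lines.append(prefix)
--     return "(" + "\n| ".join(lines) + ")"
-- ===== Notes on version B (the rewrite author's own statement) =====
-- stated objective: faster
-- what changed: The inner j-loop that rebuilds and re-joins the equality prefix for every line is replaced by a single pass that maintains the growing prefix string as an accumulator, so each line is formed from the already-built prefix.
import Mathlib
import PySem

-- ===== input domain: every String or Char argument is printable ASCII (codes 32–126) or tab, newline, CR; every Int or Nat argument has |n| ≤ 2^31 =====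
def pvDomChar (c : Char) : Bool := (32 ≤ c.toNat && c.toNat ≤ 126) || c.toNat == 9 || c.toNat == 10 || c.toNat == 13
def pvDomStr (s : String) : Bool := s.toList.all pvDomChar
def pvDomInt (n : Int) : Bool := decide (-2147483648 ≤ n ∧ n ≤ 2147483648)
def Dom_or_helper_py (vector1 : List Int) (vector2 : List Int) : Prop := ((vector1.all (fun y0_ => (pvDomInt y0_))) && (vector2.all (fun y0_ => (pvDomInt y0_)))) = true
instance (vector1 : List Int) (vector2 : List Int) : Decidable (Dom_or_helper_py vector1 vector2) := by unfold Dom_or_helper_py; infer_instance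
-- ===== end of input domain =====

-- ===== PORT A =====
-- B re-implements A with a single pass that maintains the joined equality prefix
-- as an accumulator instead of rebuilding and re-joining it for every line.
-- A's 1-based views: A = [None] + vector1, so the A[j] the code reads (j >= 1) is
-- vector1[j-1], ported as pyGetD with default 0 (always in range under Pre_).
def or_helper_py (vector1 : List Int) (vector2 : List Int) : String :=
  let A := fun (j : Int) => PySem.List.pyGetD vector1 (j - 1) 0
  let B := fun (j : Int) => PySem.List.pyGetD vector2 (j - 1) 0
  let res : List String := ["(!x" ++ PySem.Int.toStr (A 1) ++ " & x" ++ PySem.Int.toStr (B 1) ++ ")"]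
  -- assert len(vector1) == len(vector2): AssertionError excluded by Pre_
  let res := (PySem.List.pyRange 1 (PySem.List.len vector1) 1).foldl (fun res i =>
      let temp : List String := (PySem.List.pyRange 1 (i + 1) 1).foldl (fun temp j =>
          temp ++ ["(x" ++ PySem.Int.toStr (A j) ++ " = x" ++ PySem.Int.toStr (B j) ++ ")"]) []
      let tempS := PySem.Str.join " & " temp
      res ++ ["(" ++ tempS ++ " & (!x" ++ PySem.Int.toStr (A (i + 1)) ++ " & x" ++ PySem.Int.toStr (B (i + 1)) ++ "))"]) res
  let temp : List String := (PySem.List.pyRange 1 (PySem.List.len vector1 + 1) 1).foldl (fun temp i =>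
      temp ++ ["(x" ++ PySem.Int.toStr (A i) ++ " = x" ++ PySem.Int.toStr (B i) ++ ")"]) []
  let res := res ++ [PySem.Str.join " & " temp]
  "(" ++ PySem.Str.join "\n| " res ++ ")"

-- ===== PORT B =====
def or_helper_py_alt (vector1 : List Int) (vector2 : List Int) : String :=
  let prefix0 := "(x" ++ PySem.Int.toStr (PySem.List.pyGetD vector1 0 0) ++ " = x" ++ PySem.Int.toStr (PySem.List.pyGetD vector2 0 0) ++ ")"
  let lines0 : List String := ["(!x" ++ PySem.Int.toStr (PySem.List.pyGetD vector1 0 0) ++ " & x" ++ PySem.Int.toStr (PySem.List.pyGetD vector2 0 0) ++ ")"]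
  let st := (PySem.List.pyRange 1 (PySem.List.len vector1) 1).foldl
      (fun (st : String × List String) i =>
        (st.1 ++ " & (x" ++ PySem.Int.toStr (PySem.List.pyGetD vector1 i 0) ++ " = x" ++ PySem.Int.toStr (PySem.List.pyGetD vector2 i 0) ++ ")",
         st.2 ++ ["(" ++ st.1 ++ " & (!x" ++ PySem.Int.toStr (PySem.List.pyGetD vector1 i 0) ++ " & x" ++ PySem.Int.toStr (PySem.List.pyGetD vector2 i 0) ++ "))"]))
      (prefix0, lines0)
  "(" ++ PySem.Str.join "\n| " (st.2 ++ [st.1]) ++ ")"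

-- ===== PRECONDITION & SPEC =====
-- Pre_ excludes exactly the inputs on which A raises: empty vectors (IndexError at
-- A[1]/B[1]) and unequal lengths (AssertionError).
def Pre_or_helper_py (vector1 : List Int) (vector2 : List Int) : Prop :=
  vector1.length = vector2.length ∧ vector1 ≠ []
instance (vector1 : List Int) (vector2 : List Int) : Decidable (Pre_or_helper_py vector1 vector2) := by unfold Pre_or_helper_py; infer_instance
def pvWitness_or_helper_py : List Int × List Int := ([1, 2], [3, 4])
def Spec_or_helper_py (vector1 : List Int) (vector2 : List Int) (out : String) : Prop := out = or_helper_py_alt vector1 vector2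
instance (vector1 : List Int) (vector2 : List Int) (out : String) : Decidable (Spec_or_helper_py vector1 vector2 out) := by unfold Spec_or_helper_py; infer_instance

-- ===== CLAIM (what is proved, stated in full; the proofs are below) =====
def Claim_equal_or_helper_py : Prop := ∀ (vector1 : List Int) (vector2 : List Int), Dom_or_helper_py vector1 vector2 → Pre_or_helper_py vector1 vector2 → Spec_or_helper_py vector1 vector2 (or_helper_py vector1 vector2)

-- ===== LEMMAS AND PROOFS =====
-- the equality clause "(x{v1[k]} = x{v2[k]})" (0-based k)
def eqS (v1 v2 : List Int) (k : Nat) : String :=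
  "(x" ++ PySem.Int.toStr (v1.getD k 0) ++ " = x" ++ PySem.Int.toStr (v2.getD k 0) ++ ")"
-- the join of the first m equality clauses
def Jn (v1 v2 : List Int) (m : Nat) : String :=
  PySem.Str.join " & " ((List.range m).map (eqS v1 v2))
-- the line for 0-based index k (k >= 1): prefix of k equalities, then the strict term
def lineS (v1 v2 : List Int) (k : Nat) : String :=
  "(" ++ Jn v1 v2 k ++ " & (!x" ++ PySem.Int.toStr (v1.getD k 0) ++ " & x" ++ PySem.Int.toStr (v2.getD k 0) ++ "))"

theorem join_cc (s a b : String) (t : List String) :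
    PySem.Str.join s (a :: b :: t) = a ++ (s ++ PySem.Str.join s (b :: t)) := by
  simp [PySem.Str.join, PySem.Chars.join_cons_cons]

theorem join_concat (s y : String) (xs : List String) (h : xs ≠ []) :
    PySem.Str.join s (xs ++ [y]) = PySem.Str.join s xs ++ (s ++ y) := by
  induction xs with
  | nil => simp at h
  | cons a t ih =>
    cases t with
    | nil => simp [PySem.Str.join, PySem.Chars.join_cons_cons]
    | cons b t' =>
      simp only [List.cons_append] at ih ⊢
      rw [join_cc, ih (by simp), join_cc, String.append_assoc, String.append_assoc]

theorem join_singleton' (s y : String) : PySem.Str.join s [y] = y := by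
  simp [PySem.Str.join]

theorem Jn_succ (v1 v2 : List Int) (m : Nat) (hm : 1 ≤ m) :
    Jn v1 v2 (m + 1) = Jn v1 v2 m ++ (" & " ++ eqS v1 v2 m) := by
  unfold Jn
  rw [List.range_succ, List.map_append, List.map_singleton,
    join_concat _ _ _ (by simp; omega)]

-- B's prefix update appends " & (x{a} = x{b})" in one piece; split the literal
theorem prefix_step (p : String) (a b : Int) :
    p ++ " & (x" ++ PySem.Int.toStr a ++ " = x" ++ PySem.Int.toStr b ++ ")"
      = p ++ (" & " ++ ("(x" ++ PySem.Int.toStr a ++ " = x" ++ PySem.Int.toStr b ++ ")")) := by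
  apply String.toList_inj.mp
  simp

-- B's loop invariant: after the iterations i = 1 .. m-1, the prefix is the join of
-- the first m equality clauses and the lines are the OR terms for indices 0 .. m-1.
theorem foldB_inv (v1 v2 : List Int) (L0 : List String) (m : Nat) (hm : 1 ≤ m) :
    (PySem.List.pyRange 1 (m : Int) 1).foldl
      (fun (st : String × List String) i =>
        (st.1 ++ " & (x" ++ PySem.Int.toStr (PySem.List.pyGetD v1 i 0) ++ " = x" ++ PySem.Int.toStr (PySem.List.pyGetD v2 i 0) ++ ")",
         st.2 ++ ["(" ++ st.1 ++ " & (!x" ++ PySem.Int.toStr (PySem.List.pyGetD v1 i 0) ++ " & x" ++ PySem.Int.toStr (PySem.List.pyGetD v2 i 0) ++ "))"]))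
      (eqS v1 v2 0, L0)
      = (Jn v1 v2 m, L0 ++ (List.range (m - 1)).map (fun k => lineS v1 v2 (k + 1))) := by
  induction m with
  | zero => omega
  | succ m ih =>
    rcases Nat.lt_or_ge m 1 with hm1 | hm1
    · -- m = 0 : the range is empty
      interval_cases m
      rw [PySem.List.pyRange_one_eq_nil (by norm_num)]
      simp [Jn, eqS, join_singleton']
    · have hcast : ((m : Int) + 1) = ((m + 1 : Nat) : Int) := by push_cast; ring
      rw [← hcast, PySem.List.pyRange_one_succ_right (by exact_mod_cast hm1),
        List.foldl_append, ih hm1]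
      simp only [List.foldl_cons, List.foldl_nil, Prod.mk.injEq]
      constructor
      · rw [prefix_step, Jn_succ v1 v2 m hm1]
        simp [eqS]
      · have hsub : m - 1 + 1 = m := by omega
        have hr : List.range m = List.range (m - 1) ++ [m - 1] := by
          conv_lhs => rw [← hsub]
          rw [List.range_succ]
        rw [Nat.add_sub_cancel, hr]
        simp [lineS, hsub]

theorem Jn_def (v1 v2 : List Int) (m : Nat) :
    PySem.Str.join " & " ((List.range m).map (eqS v1 v2)) = Jn v1 v2 m := rfl

theorem inner_eq (v1 v2 : List Int) (m : Nat) :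
    List.map (fun x : Int => "(x" ++ PySem.Int.toStr (PySem.List.pyGetD v1 (x - 1) 0) ++ " = x" ++ PySem.Int.toStr (PySem.List.pyGetD v2 (x - 1) 0) ++ ")") (PySem.List.pyRange 1 ((m : Int) + 1) 1)
      = (List.range m).map (eqS v1 v2) := by
  rw [PySem.List.pyRange_one]
  simp only [List.map_map]
  have ht : ((m : Int) + 1 - 1).toNat = m := by omega
  rw [ht]
  apply List.map_congr_left
  intro k hk
  have h1 : (1 : Int) + (k : Int) - 1 = (k : Int) := by omega
  simp [Function.comp, h1, eqS]

theorem A_norm (v1 v2 : List Int) (hn : 1 ≤ v1.length) :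
    or_helper_py v1 v2 = "(" ++ PySem.Str.join "\n| "
      ((("(!x" ++ PySem.Int.toStr (v1.getD 0 0) ++ " & x" ++ PySem.Int.toStr (v2.getD 0 0) ++ ")") ::
        ((List.range (v1.length - 1)).map (fun k => lineS v1 v2 (k + 1)) ++ [Jn v1 v2 v1.length]))) ++ ")" := by
  simp only [or_helper_py, PySem.List.len_eq, PySem.List.foldl_append_singleton_eq_map]
  rw [PySem.List.pyRange_one]
  simp only [List.nil_append, List.map_map]
  rw [inner_eq v1 v2 v1.length, Jn_def]
  have ht : ((v1.length : Int) - 1).toNat = v1.length - 1 := by omega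
  rw [ht]
  have h0 : (1 : Int) - 1 = 0 := by norm_num
  simp only [h0, PySem.List.pyGetD_zero, List.cons_append, List.nil_append]
  refine congrArg (fun t => "(" ++ t ++ ")") ?_
  refine congrArg (PySem.Str.join "\n| ") ?_
  refine congrArg (fun t => _ :: t) ?_
  refine congrArg (fun t => t ++ [Jn v1 v2 v1.length]) ?_
  apply List.map_congr_left
  intro k hk
  have hx : (1 : Int) + (k : Int) + 1 = ((k + 1 : Nat) : Int) + 1 := by push_cast; ring
  simp only [Function.comp]
  rw [hx, inner_eq v1 v2 (k + 1), Jn_def]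
  have h2 : ((k + 1 : Nat) : Int) + 1 - 1 = ((k + 1 : Nat) : Int) := by omega
  rw [h2, PySem.List.pyGetD_natCast, PySem.List.pyGetD_natCast]
  simp [lineS]

theorem B_norm (v1 v2 : List Int) (hn : 1 ≤ v1.length) :
    or_helper_py_alt v1 v2 = "(" ++ PySem.Str.join "\n| "
      ((("(!x" ++ PySem.Int.toStr (v1.getD 0 0) ++ " & x" ++ PySem.Int.toStr (v2.getD 0 0) ++ ")") ::
        ((List.range (v1.length - 1)).map (fun k => lineS v1 v2 (k + 1)) ++ [Jn v1 v2 v1.length]))) ++ ")" := by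
  simp only [or_helper_py_alt, PySem.List.len_eq, PySem.List.pyGetD_zero]
  rw [show ("(x" ++ PySem.Int.toStr (v1.getD 0 0) ++ " = x" ++ PySem.Int.toStr (v2.getD 0 0) ++ ")") = eqS v1 v2 0 from rfl,
    foldB_inv v1 v2 _ v1.length hn]
  simp [List.cons_append]

theorem or_helper_py_spec : Claim_equal_or_helper_py := by
  intro v1 v2 hd hp
  obtain ⟨hlen, hne⟩ := hp
  have hn : 1 ≤ v1.length := by
    cases v1 with
    | nil => exact absurd rfl hne
    | cons a t => simp
  unfold Spec_or_helper_py
  rw [A_norm v1 v2 hn, B_norm v1 v2 hn]
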